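-- pv_equiv track=rewrite | github.com/qqqwda/pokemeow-autoplay | main2.py | get_next_ball
-- ===== SOURCE A (Python) =====
-- def get_next_ball(current_ball):
--     balls_priority = {
--         "masterball": 4,
--         "ultraball": 3,
--         "greatball": 2,
--         "pokeball": 1
--     }
--
--     # Get the priority of the current ball
--     current_priority = balls_priority.get(current_ball)
--
--     # If the current ball is not in the dictionary or it's a Pokeball, return None
--     if current_priority is None or current_priority == 1:
--         return None
--
--     # Find the ball with the next highest priority
--     for ball, priority in sorted(balls_priority.items(), key=lambda item: item[1], reverse=True):
--         if priority < current_priority: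
--             return ball
-- ===== SOURCE B (Python) =====
-- def get_next_ball(current_ball):
--     successor = {
--         "masterball": "ultraball",
--         "ultraball": "greatball",
--         "greatball": "pokeball",
--     }
--     return successor.get(current_ball)
-- ===== Notes on version B (the rewrite author's own statement) =====
-- stated objective: simpler
-- what changed: Replaces the priority lookup, the sort and the scanning loop with a single lookup in a precomputed successor table mapping each ball to the next-lower-priority ball; pokeball and unknown keys are absent so .get returns None, as in A.
import Mathlib
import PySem

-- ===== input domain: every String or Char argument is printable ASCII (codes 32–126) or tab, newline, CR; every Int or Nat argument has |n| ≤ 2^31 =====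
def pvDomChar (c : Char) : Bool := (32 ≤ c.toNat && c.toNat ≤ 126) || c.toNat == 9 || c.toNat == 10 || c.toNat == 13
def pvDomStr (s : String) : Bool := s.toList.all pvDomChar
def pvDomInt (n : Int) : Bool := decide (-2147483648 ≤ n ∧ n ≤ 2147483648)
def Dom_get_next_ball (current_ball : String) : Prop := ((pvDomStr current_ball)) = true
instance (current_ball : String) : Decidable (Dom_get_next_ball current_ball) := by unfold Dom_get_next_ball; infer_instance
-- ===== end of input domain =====

-- B replaces A's numeric-priority dict + sort + scan with one lookup in a direct successor table (simpler).

-- ===== PORT A =====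
-- the 'for ball, priority in …: if priority < current_priority: return ball' loop
def pvScanA (xs : List (String × Int)) (current_priority : Int) : Option String :=
  match xs with
  | [] => none
  | (ball, priority) :: rest =>
      if priority < current_priority then some ball else pvScanA rest current_priority

def get_next_ball (current_ball : String) : Option String :=
  let balls_priority : PySem.Dict String Int :=
    PySem.Dict.ofList [("masterball", 4), ("ultraball", 3), ("greatball", 2), ("pokeball", 1)]
  match balls_priority.get? current_ball with
  | none => none
  | some current_priority =>
      if current_priority == 1 then none
      else pvScanA (PySem.List.sorted balls_priority.items (fun item => item.2) true) current_priority

-- ===== PORT B =====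
def get_next_ball_alt (current_ball : String) : Option String :=
  let successor : PySem.Dict String String :=
    PySem.Dict.ofList [("masterball", "ultraball"), ("ultraball", "greatball"), ("greatball", "pokeball")]
  successor.get? current_ball

-- ===== PRECONDITION & SPEC =====
def Spec_get_next_ball (current_ball : String) (out : Option String) : Prop := out = get_next_ball_alt current_ball
instance (current_ball : String) (out : Option String) : Decidable (Spec_get_next_ball current_ball out) := by unfold Spec_get_next_ball; infer_instance

-- ===== CLAIM (what is proved, stated in full; the proofs are below) =====
def Claim_equal_get_next_ball : Prop := ∀ (current_ball : String), Dom_get_next_ball current_ball → Spec_get_next_ball current_ball (get_next_ball current_ball)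

-- ===== LEMMAS AND PROOFS =====

-- ===== VERDICT (by name: the statement is the Claim_ definition above) =====
theorem get_next_ball_spec : Claim_equal_get_next_ball := by
  intro cb _
  unfold Spec_get_next_ball get_next_ball get_next_ball_alt
  by_cases h1 : cb = "masterball"; · subst h1; decide
  by_cases h2 : cb = "ultraball"; · subst h2; decide
  by_cases h3 : cb = "greatball"; · subst h3; decide
  by_cases h4 : cb = "pokeball"; · subst h4; decide
  have hA : (PySem.Dict.ofList [("masterball", (4:Int)), ("ultraball", 3), ("greatball", 2), ("pokeball", 1)]).items
      = [("masterball", 4), ("ultraball", 3), ("greatball", 2), ("pokeball", 1)] := by decide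
  have hB : (PySem.Dict.ofList [("masterball", "ultraball"), ("ultraball", "greatball"), ("greatball", "pokeball")]).items
      = [("masterball", "ultraball"), ("ultraball", "greatball"), ("greatball", "pokeball")] := by decide
  have e1 : ("masterball" == cb) = false := beq_eq_false_iff_ne.mpr (Ne.symm h1)
  have e2 : ("ultraball" == cb) = false := beq_eq_false_iff_ne.mpr (Ne.symm h2)
  have e3 : ("greatball" == cb) = false := beq_eq_false_iff_ne.mpr (Ne.symm h3)
  have e4 : ("pokeball" == cb) = false := beq_eq_false_iff_ne.mpr (Ne.symm h4)
  simp only [PySem.Dict.get?, hA, hB, List.find?, e1, e2, e3, e4]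
  rfl
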